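-- pv_equiv track=rewrite | github.com/jlfzzz/algorithms | leetcode/lc周赛/462/3.py | maxTotal
-- ===== SOURCE A (Python) =====
-- from typing import List
--
-- def maxTotal(value: List[int], limit: List[int]) -> int:
--     n = len(value)
--
--     arr = [[v, l] for (v, l) in zip(value, limit)]
--     arr.sort(key=lambda x: (x[1], -x[0]))
--     ans = 0
--     prev = -1
--     cnt = 0
--     for i, ar in enumerate(arr):
--         v, l = ar[0], ar[1]
--         if l != prev:
--             cnt = 0
--         if l == prev and cnt == l:
--             continue
--         cnt += 1
--         ans += v
--         prev = l
--     return ans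
-- ===== SOURCE B (Python) =====
-- from typing import List
-- from collections import defaultdict
--
-- def maxTotal(value: List[int], limit: List[int]) -> int:
--     groups = defaultdict(list)
--     for v, l in zip(value, limit):
--         groups[l].append(v)
--     total = 0
--     for l, g in groups.items():
--         g.sort(reverse=True)
--         taken = 0
--         for v in g:
--             total += v
--             taken += 1
--             if taken == l:
--                 break
--     return total
-- ===== Notes on version B (the rewrite author's own statement) =====
-- stated objective: alternative
-- what changed: Replaces A's single global sort of all pairs under the tuple key (limit,-value) plus a running prev/cnt sweep by one pass that buckets values per limit in a dict, then sorts each group descending and takes from it until the count reaches the group's limit.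
import Mathlib
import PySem

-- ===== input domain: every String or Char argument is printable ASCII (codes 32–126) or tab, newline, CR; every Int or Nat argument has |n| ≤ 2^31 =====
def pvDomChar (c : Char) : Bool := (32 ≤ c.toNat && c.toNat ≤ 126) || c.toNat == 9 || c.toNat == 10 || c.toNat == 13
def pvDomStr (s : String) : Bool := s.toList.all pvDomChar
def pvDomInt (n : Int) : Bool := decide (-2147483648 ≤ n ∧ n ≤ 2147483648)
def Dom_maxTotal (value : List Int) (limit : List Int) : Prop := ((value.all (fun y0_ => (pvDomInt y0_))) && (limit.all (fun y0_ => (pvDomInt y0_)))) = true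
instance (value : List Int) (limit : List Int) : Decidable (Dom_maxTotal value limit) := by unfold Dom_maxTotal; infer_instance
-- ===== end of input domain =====

-- B buckets values per limit in a dict in one pass, sorts each (smaller) group descending and takes
-- from it until the count reaches the group's limit, instead of A's single global (limit,-value)
-- sort followed by a prev/cnt sweep; same results on every input.

-- ===== PORT A =====
-- A-side helper: the body of A's for-loop (state = (ans, prev, cnt), element = (v, l)).
def pvStep (st : Int × Int × Int) (q : Int × Int) : Int × Int × Int :=
  let cnt := if q.2 ≠ st.2.1 then 0 else st.2.2
  if q.2 = st.2.1 ∧ cnt = q.2 then (st.1, st.2.1, cnt)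
  else (st.1 + q.1, q.2, cnt + 1)

def maxTotal (value : List Int) (limit : List Int) : Int :=
  let arr := value.zip limit
  let arr := PySem.List.sorted2 arr (fun x => x.2) (fun x => -x.1)
  let fin := (PySem.List.enumerate arr).foldl (fun st iar => pvStep st iar.2) (0, -1, 0)
  fin.1

-- ===== PORT B =====
-- B-side helper: the inner 'for v in g: … if taken == l: break' loop.
def pvTake (l : Int) (total : Int) (taken : Int) : List Int → Int
  | [] => total
  | v :: g =>
    let total := total + v
    let taken := taken + 1
    if taken = l then total else pvTake l total taken g

def maxTotal_alt (value : List Int) (limit : List Int) : Int :=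
  let groups := (value.zip limit).foldl
    (fun d p => d.modify p.2 [] (fun g => g ++ [p.1])) (PySem.Dict.empty : PySem.Dict Int (List Int))
  groups.items.foldl (fun total kv =>
    pvTake kv.1 total 0 (PySem.List.sorted kv.2 (fun x => x) true)) 0

-- ===== PRECONDITION & SPEC =====
def Spec_maxTotal (value : List Int) (limit : List Int) (out : Int) : Prop := out = maxTotal_alt value limit
instance (value : List Int) (limit : List Int) (out : Int) : Decidable (Spec_maxTotal value limit out) := by unfold Spec_maxTotal; infer_instance

-- ===== CLAIM (what is proved, stated in full; the proofs are below) =====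
def Claim_equal_maxTotal : Prop := ∀ (value : List Int) (limit : List Int), Dom_maxTotal value limit → Spec_maxTotal value limit (maxTotal value limit)

-- ===== LEMMAS AND PROOFS =====

-- the lexicographic order A sorts by: limit ascending, value descending within equal limits
def KLE (p q : Int × Int) : Prop := p.2 < q.2 ∨ (p.2 = q.2 ∧ q.1 ≤ p.1)

-- how many of a (descending) group of n values with limit l are taken
def tkN (l : Int) (n : Nat) : Nat := if l < 1 then n else min l.toNat n

-- contribution of one group (g already sorted descending)
def Tl (l : Int) (g : List Int) : Int := (g.take (tkN l g.length)).sum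

def valsOf (zs : List (Int × Int)) (l : Int) : List Int :=
  (zs.filter (fun p => p.2 == l)).map (fun p => p.1)

-- sum over distinct limits of zs of the group contributions, groups in zs order
def SpecB (zs : List (Int × Int)) : Int :=
  ((PySem.List.dedup (zs.map (fun p => p.2))).map (fun l => Tl l (valsOf zs l))).sum

lemma foldl_enum_snd {σ α : Type} (f : σ → α → σ) :
    ∀ (l : List α) (k : Int) (s : σ),
      List.foldl (fun st p => f st p.2) s (PySem.List.enumerate l k) = List.foldl f s l := by
  intro l
  induction l with
  | nil => intro k s; simp [PySem.List.enumerate_nil]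
  | cons x xs ih => intro k s; rw [PySem.List.enumerate_cons]; simp only [List.foldl_cons]; exact ih _ _

lemma KLE_trans : ∀ {a b c : Int × Int}, KLE a b → KLE b c → KLE a c := by
  intro a b c h1 h2; unfold KLE at *; omega

lemma pairwise_insertBy {α : Type} (before : α → α → Bool) (R : α → α → Prop)
    (hpos : ∀ a b, before a b = true → R a b) (hneg : ∀ a b, before a b = false → R b a)
    (htrans : ∀ {a b c}, R a b → R b c → R a c) :
    ∀ (acc : List α) (x : α), acc.Pairwise R → (PySem.List.insertBy before x acc).Pairwise R := by
  intro acc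
  induction acc with
  | nil => intro x _; simp [PySem.List.insertBy]
  | cons y ys ih =>
    intro x hp
    rw [List.pairwise_cons] at hp
    obtain ⟨hy, hys⟩ := hp
    show (PySem.List.insertBy before x (y :: ys)).Pairwise R
    by_cases hb : before x y = true
    · simp only [PySem.List.insertBy, hb, if_pos]
      rw [List.pairwise_cons]
      refine ⟨?_, List.pairwise_cons.mpr ⟨hy, hys⟩⟩
      intro z hz
      rcases List.mem_cons.mp hz with rfl | hz'
      · exact hpos _ _ hb
      · exact htrans (hpos _ _ hb) (hy _ hz')
    · have hb' : before x y = false := by simpa using hb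
      simp only [PySem.List.insertBy, hb', Bool.false_eq_true, if_false]
      rw [List.pairwise_cons]
      constructor
      · intro z hz
        rcases (PySem.List.mem_insertBy before x z ys).mp hz with rfl | hz'
        · exact hneg _ _ hb'
        · exact hy _ hz'
      · exact ih x hys

lemma sorted2_pairwise_KLE (xs : List (Int × Int)) :
    (PySem.List.sorted2 xs (fun x => x.2) (fun x => -x.1)).Pairwise KLE := by
  unfold PySem.List.sorted2
  simp only [if_neg (by decide : ¬ (false = true))]
  have key : ∀ (l : List (Int × Int)) (acc : List (Int × Int)), acc.Pairwise KLE →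
      (List.foldl (fun acc x => PySem.List.insertBy
        (fun a b => decide (a.2 < b.2) || !decide (b.2 < a.2) && decide (-a.1 < -b.1)) x acc) acc l).Pairwise KLE := by
    intro l
    induction l with
    | nil => intro acc h; simpa
    | cons x xs ih =>
      intro acc h
      simp only [List.foldl_cons]
      apply ih
      apply pairwise_insertBy _ KLE _ _ (fun {a b c} => KLE_trans) _ _ h
      · intro a b hb
        simp only [Bool.or_eq_true, Bool.and_eq_true, Bool.not_eq_true', decide_eq_true_eq,
          decide_eq_false_iff_not] at hb
        unfold KLE; omega
      · intro a b hb
        simp only [Bool.or_eq_false_iff, Bool.and_eq_false_iff, Bool.not_eq_false', decide_eq_true_eq,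
          decide_eq_false_iff_not] at hb
        unfold KLE; omega
  exact key xs [] List.Pairwise.nil

-- how many of the REST of a block are taken when the counter already stands at c ≥ 1
def restK (l0 c : Int) (n : Nat) : Nat := if l0 < c then n else min (l0 - c).toNat n

lemma foldBlock (l0 : Int) : ∀ (w : List Int) (a c : Int), 1 ≤ c →
    List.foldl pvStep (a, l0, c) (w.map (fun v => (v, l0))) =
      (a + ((w.take (restK l0 c w.length)).sum), l0, c + restK l0 c w.length) := by
  intro w
  induction w with
  | nil => intro a c _; simp [restK]
  | cons v w' ih =>
    intro a c hc
    simp only [List.map_cons, List.foldl_cons]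
    by_cases hcl : c = l0
    · have hstep : pvStep (a, l0, c) (v, l0) = (a, l0, c) := by
        simp [pvStep, hcl]
      rw [hstep, ih a c hc]
      have h1 : restK l0 c (v :: w').length = 0 := by
        simp only [restK, List.length_cons]; subst hcl; simp
      have h2 : restK l0 c w'.length = 0 := by
        simp only [restK]; subst hcl; simp
      rw [h1, h2]; simp
    · have hstep : pvStep (a, l0, c) (v, l0) = (a + v, l0, c + 1) := by
        simp [pvStep, hcl]
      rw [hstep, ih (a + v) (c + 1) (by omega)]
      have harith : restK l0 c (v :: w').length = restK l0 (c + 1) w'.length + 1 := by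
        simp only [restK, List.length_cons]
        rcases lt_trichotomy l0 c with h | h | h
        · rw [if_pos h, if_pos (by omega)]
        · omega
        · rw [if_neg (by omega), if_neg (by omega)]; omega
      rw [harith, List.take_succ_cons, List.sum_cons]
      refine congrArg₂ Prod.mk (by ring) (congrArg₂ Prod.mk rfl (by push_cast; ring))

-- a whole block (all limits l0, at least one element), from a safe starting state
lemma foldBlockFull (l0 : Int) (v0 : Int) (w' : List Int) (a p c : Int)
    (hsafe : p ≠ l0 ∨ (c = 0 ∧ l0 ≠ 0)) :
    ∃ c', 1 ≤ c' ∧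
    List.foldl pvStep (a, p, c) (((v0 :: w').map (fun v => (v, l0)))) =
      (a + Tl l0 (v0 :: w'), l0, c') := by
  have hstep : pvStep (a, p, c) (v0, l0) = (a + v0, l0, 1) := by
    simp only [pvStep]
    have hns : ¬(l0 = p ∧ (if l0 ≠ p then (0:Int) else c) = l0) := by
      rcases hsafe with h | ⟨hc, hl⟩
      · intro hh; exact h hh.1.symm
      · intro hh
        obtain ⟨he, hcnt⟩ := hh
        rw [if_neg (by omega)] at hcnt
        omega
    rw [if_neg hns]
    have hcnt0 : (if l0 ≠ p then (0:Int) else c) = 0 := by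
      rcases hsafe with h | ⟨hc, hl⟩
      · rw [if_pos (Ne.symm h)]
      · split <;> omega
    rw [hcnt0]
    norm_num
  have harith : tkN l0 (v0 :: w').length = restK l0 1 w'.length + 1 := by
    simp only [tkN, restK, List.length_cons]
    rcases lt_trichotomy l0 1 with h | h | h
    · rw [if_pos h, if_pos (by omega)]
    · subst h; simp
    · rw [if_neg (by omega), if_neg (by omega)]; omega
  simp only [List.map_cons, List.foldl_cons, hstep]
  rw [foldBlock l0 w' (a + v0) 1 le_rfl]
  refine ⟨1 + restK l0 1 w'.length, by omega, ?_⟩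
  unfold Tl
  rw [harith, List.take_succ_cons, List.sum_cons]
  refine congrArg₂ Prod.mk (by ring) (congrArg₂ Prod.mk rfl (by omega))

lemma ofList_cons_notmem (l0 : Int) :
    ∀ (w s : List Int), l0 ∉ w →
      List.foldl PySem.Set.add (l0 :: s) w = l0 :: List.foldl PySem.Set.add s w := by
  intro w
  induction w with
  | nil => intro s _; rfl
  | cons y w' ih =>
    intro s hm
    have hy : y ≠ l0 := by intro h; exact hm (by simp [h])
    simp only [List.foldl_cons]
    have : PySem.Set.add (l0 :: s) y = l0 :: PySem.Set.add s y := by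
      simp only [PySem.Set.add, PySem.Set.contains, List.contains_cons]
      have : (y == l0) = false := by simpa using hy
      rw [this]
      simp only [Bool.false_or]
      by_cases hc : s.contains y
      · rw [if_pos hc, if_pos hc]
      · rw [if_neg hc, if_neg hc]; rfl
    rw [this, ih _ (fun h => hm (List.mem_cons_of_mem _ h))]

lemma dedup_block (l0 : Int) (u w : List Int) (hu : ∀ x ∈ u, x = l0) (hne : u ≠ [])
    (hw : l0 ∉ w) :
    PySem.List.dedup (u ++ w) = l0 :: PySem.List.dedup w := by
  rw [PySem.List.dedup_eq_ofList, PySem.List.dedup_eq_ofList]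
  show List.foldl PySem.Set.add [] (u ++ w) = l0 :: List.foldl PySem.Set.add [] w
  rw [List.foldl_append]
  have hfold_u : List.foldl PySem.Set.add [] u = [l0] := by
    cases u with
    | nil => exact absurd rfl hne
    | cons x u' =>
      have hx : x = l0 := hu x (by simp)
      subst hx
      simp only [List.foldl_cons]
      have hstart : PySem.Set.add ([] : List Int) x = [x] := rfl
      rw [hstart]
      have : ∀ (u'' : List Int), (∀ y ∈ u'', y = x) → List.foldl PySem.Set.add [x] u'' = [x] := by
        intro u''
        induction u'' with
        | nil => intro _; rfl
        | cons z u3 ih3 =>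
          intro hz
          have : z = x := hz z (by simp)
          subst this
          simp only [List.foldl_cons]
          have : PySem.Set.add [z] z = [z] := by simp [PySem.Set.add, PySem.Set.contains]
          rw [this]
          exact ih3 (fun y hy => hz y (by simp [hy]))
      exact this u' (fun y hy => hu y (by simp [hy]))
  rw [hfold_u]
  exact ofList_cons_notmem l0 w [] hw

-- the main sweep decomposition: on a KLE-sorted list the sweep computes the per-group sum
lemma mainA : ∀ (n : Nat) (s : List (Int × Int)) (a p c : Int), s.length = n →
    s.Pairwise KLE → (p ∉ s.map (fun q => q.2) ∨ (c = 0 ∧ p = -1)) →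
    (List.foldl pvStep (a, p, c) s).1 = a + SpecB s := by
  intro n
  induction n using Nat.strong_induction_on with
  | _ n ih =>
    intro s a p c hlen hpw hsafe
    cases s with
    | nil => simp [SpecB]
    | cons q0 t =>
      obtain ⟨v0, l0⟩ := q0
      set b := List.takeWhile (fun q : Int × Int => q.2 == l0) ((v0, l0) :: t) with hb
      set r := List.dropWhile (fun q : Int × Int => q.2 == l0) ((v0, l0) :: t) with hr
      have hsplit : b ++ r = (v0, l0) :: t := List.takeWhile_append_dropWhile
      have hbcons : b = (v0, l0) :: List.takeWhile (fun q : Int × Int => q.2 == l0) t := by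
        simp [hb]
      have hbl : ∀ q ∈ b, q.2 = l0 := by
        intro q hq
        have := List.mem_takeWhile_imp hq
        simpa using this
      have hpw' : (b ++ r).Pairwise KLE := by rw [hsplit]; exact hpw
      have hpwb : b.Pairwise KLE := (List.pairwise_append.mp hpw').1
      have hpwr : r.Pairwise KLE := (List.pairwise_append.mp hpw').2.1
      have hbr : ∀ x ∈ b, ∀ y ∈ r, KLE x y := (List.pairwise_append.mp hpw').2.2
      have hrgt : ∀ y ∈ r, l0 < y.2 := by
        intro y hy
        cases hhr : r with
        | nil => rw [hhr] at hy; simp at hy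
        | cons y0 r' =>
          have hy0l : y0.2 ≠ l0 := by
            have hne : List.dropWhile (fun q : Int × Int => q.2 == l0) ((v0, l0) :: t) ≠ [] := by
              rw [← hr, hhr]; simp
            have hhead := List.head_dropWhile_not (fun q : Int × Int => q.2 == l0) hne
            have hh2 : (List.dropWhile (fun q : Int × Int => q.2 == l0) ((v0, l0) :: t)).head hne = y0 := by
              have : List.dropWhile (fun q : Int × Int => q.2 == l0) ((v0, l0) :: t) = y0 :: r' := by
                rw [← hr, hhr]
              simp [this]
            rw [hh2] at hhead
            simpa using hhead
          have hb0 : (v0, l0) ∈ b := by rw [hbcons]; simp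
          have h1 : KLE (v0, l0) y0 := hbr _ hb0 _ (by rw [hhr]; simp)
          have hy0gt : l0 < y0.2 := by
            rcases h1 with h | ⟨h, _⟩
            · exact h
            · exact absurd h.symm hy0l
          rw [hhr] at hy
          rcases List.mem_cons.mp hy with rfl | hy'
          · exact hy0gt
          · have h2 : KLE y0 y := by
              rw [hhr] at hpwr
              exact (List.pairwise_cons.mp hpwr).1 y hy'
            rcases h2 with h | ⟨h, _⟩
            · omega
            · omega
      have hrne : l0 ∉ r.map (fun q => q.2) := by
        intro hmem
        obtain ⟨y, hy, hy2⟩ := List.mem_map.mp hmem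
        exact absurd hy2 (by have := hrgt y hy; omega)
      have hbmap : b = (b.map (fun q => q.1)).map (fun v => (v, l0)) := by
        rw [List.map_map]
        conv_lhs => rw [← List.map_id b]
        apply List.map_congr_left
        intro q hq
        have := hbl q hq
        simp [Function.comp, ← this]
      have hbne : b.map (fun q => q.1) = v0 :: (List.takeWhile (fun q : Int × Int => q.2 == l0) t).map (fun q => q.1) := by
        rw [hbcons]; simp
      have hsafe0 : p ≠ l0 ∨ (c = 0 ∧ l0 ≠ 0) := by
        rcases hsafe with h | ⟨hc, hp⟩
        · left; intro hh; apply h; rw [← hsplit]; subst hh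
          exact List.mem_map.mpr ⟨(v0, p), by rw [hbcons]; simp, rfl⟩
        · by_cases hpl : p = l0
          · right; exact ⟨hc, by omega⟩
          · left; exact hpl
      obtain ⟨c', hc', hfoldb⟩ := foldBlockFull l0 v0 ((List.takeWhile (fun q : Int × Int => q.2 == l0) t).map (fun q => q.1)) a p c hsafe0
      have hfoldb' : List.foldl pvStep (a, p, c) b = (a + Tl l0 (b.map (fun q => q.1)), l0, c') := by
        rw [← hbne, ← hbmap] at hfoldb
        exact hfoldb
      have hrlen : r.length < n := by
        have : b.length + r.length = n := by
          rw [← hlen, ← hsplit]; simp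
        have hbpos : 0 < b.length := by rw [hbcons]; simp
        omega
      have hIH := ih r.length hrlen r (a + Tl l0 (b.map (fun q => q.1))) l0 c' rfl hpwr (Or.inl hrne)
      have hfold : (List.foldl pvStep (a, p, c) ((v0, l0) :: t)).1 =
          a + Tl l0 (b.map (fun q => q.1)) + SpecB r := by
        rw [← hsplit, List.foldl_append, hfoldb', hIH]
      rw [hfold]
      have hfilter_b : b.filter (fun p => p.2 == l0) = b := by
        apply List.filter_eq_self.mpr
        intro q hq; simpa using hbl q hq
      have hfilter_r0 : r.filter (fun p => p.2 == l0) = [] := by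
        apply List.filter_eq_nil_iff.mpr
        intro q hq; have := hrgt q hq; simp; omega
      have hvals0 : valsOf ((v0, l0) :: t) l0 = b.map (fun q => q.1) := by
        unfold valsOf
        rw [← hsplit, List.filter_append, hfilter_b, hfilter_r0, List.append_nil]
      have hdedup : PySem.List.dedup (((v0, l0) :: t).map (fun q => q.2)) =
          l0 :: PySem.List.dedup (r.map (fun q => q.2)) := by
        rw [← hsplit, List.map_append]
        apply dedup_block l0
        · intro x hx
          obtain ⟨q, hq, rfl⟩ := List.mem_map.mp hx
          exact hbl q hq
        · rw [hbcons]; simp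
        · exact hrne
      have hvals_r : ∀ l ∈ PySem.List.dedup (r.map (fun q => q.2)),
          valsOf ((v0, l0) :: t) l = valsOf r l := by
        intro l hl
        have hll0 : l ≠ l0 := by
          intro h; subst h
          exact hrne ((PySem.List.mem_dedup _ _).mp hl)
        unfold valsOf
        rw [← hsplit, List.filter_append]
        have : b.filter (fun p => p.2 == l) = [] := by
          apply List.filter_eq_nil_iff.mpr
          intro q hq
          have hq2 := hbl q hq
          simp only [hq2, beq_iff_eq]
          exact fun hcon => hll0 hcon.symm
        rw [this, List.nil_append]
      unfold SpecB
      rw [hdedup]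
      simp only [List.map_cons, List.sum_cons]
      rw [hvals0]
      have : (PySem.List.dedup (r.map (fun q => q.2))).map (fun l => Tl l (valsOf ((v0, l0) :: t) l)) =
          (PySem.List.dedup (r.map (fun q => q.2))).map (fun l => Tl l (valsOf r l)) := by
        apply List.map_congr_left
        intro l hl
        rw [hvals_r l hl]
      rw [this]
      ring

-- A equals SpecB of the sorted list
lemma maxTotal_eq_SpecB (value limit : List Int) :
    maxTotal value limit = SpecB (PySem.List.sorted2 (value.zip limit) (fun x => x.2) (fun x => -x.1)) := by
  show (List.foldl (fun st iar => pvStep st iar.2) (0, -1, 0)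
      (PySem.List.enumerate (PySem.List.sorted2 (value.zip limit) (fun x => x.2) (fun x => -x.1)))).1 = _
  rw [foldl_enum_snd pvStep]
  have := mainA (PySem.List.sorted2 (value.zip limit) (fun x => x.2) (fun x => -x.1)).length
    (PySem.List.sorted2 (value.zip limit) (fun x => x.2) (fun x => -x.1)) 0 (-1) 0 rfl
    (sorted2_pairwise_KLE _) (Or.inr ⟨rfl, rfl⟩)
  rw [this]
  ring

-- B's inner loop computed in closed form
lemma pvTake_spec (l : Int) : ∀ (g : List Int) (t c : Int),
    pvTake l t c g = t + (if l ≤ c then g.sum else (g.take (min (l - c).toNat g.length)).sum) := by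
  intro g
  induction g with
  | nil => intro t c; simp [pvTake]
  | cons v g' ih =>
    intro t c
    simp only [pvTake]
    by_cases h : c + 1 = l
    · rw [if_pos h]
      have : ¬ l ≤ c := by omega
      rw [if_neg this]
      have : min (l - c).toNat (v :: g').length = 1 := by
        simp only [List.length_cons]; omega
      rw [this]
      simp
    · rw [if_neg h, ih]
      by_cases hle : l ≤ c
      · rw [if_pos hle, if_pos (by omega)]
        simp [List.sum_cons]; ring
      · rw [if_neg (by omega), if_neg hle]
        have harith : min (l - c).toNat (v :: g').length = min (l - (c + 1)).toNat g'.length + 1 := by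
          simp only [List.length_cons]; omega
        rw [harith, List.take_succ_cons, List.sum_cons]
        ring
  
lemma pvTake_eq_Tl (l : Int) (g : List Int) (t : Int) : pvTake l t 0 g = t + Tl l g := by
  rw [pvTake_spec]
  unfold Tl tkN
  by_cases h : l < 1
  · rw [if_pos (by omega : l ≤ 0), if_pos h, List.take_length]
  · rw [if_neg (by omega : ¬ l ≤ 0), if_neg h]
    have : (l - 0).toNat = l.toNat := by omega
    rw [this]

-- B equals SpecB-with-sorting of the raw zip
lemma valsOf_perm (s zs : List (Int × Int)) (hperm : s.Perm zs) (l : Int) :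
    (valsOf s l).Perm (valsOf zs l) := by
  unfold valsOf
  exact (hperm.filter _).map _

lemma valsOf_desc (s : List (Int × Int)) (hpw : s.Pairwise KLE) (l : Int) :
    (valsOf s l).Pairwise (fun a b => b ≤ a) := by
  unfold valsOf
  apply List.Pairwise.map
  · intro a b h; exact h
  · rw [List.pairwise_filter]
    refine hpw.imp ?_
    intro a b hk pa pb
    have ha2 : a.2 = l := by simpa using pa
    have hb2 : b.2 = l := by simpa using pb
    rcases hk with h | ⟨_, h⟩
    · omega
    · exact h

lemma sorted_desc_eq (s zs : List (Int × Int)) (hperm : s.Perm zs) (hpw : s.Pairwise KLE) (l : Int) :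
    PySem.List.sorted (valsOf zs l) (fun x => x) true = valsOf s l := by
  apply PySem.List.eq_of_perm_of_pairwise_le_of_injective (fun x : Int => -x)
  · intro a b h; simpa using h
  · exact (PySem.List.sorted_perm _ _ _).trans (valsOf_perm s zs hperm l).symm
  · have := PySem.List.sorted_pairwise_rev (valsOf zs l) (fun x => x)
    apply this.imp
    intro a b h; simpa using h
  · apply (valsOf_desc s hpw l).imp
    intro a b h; simpa using h

lemma maxTotal_alt_eq_SpecB (value limit : List Int) :
    maxTotal_alt value limit = SpecB (PySem.List.sorted2 (value.zip limit) (fun x => x.2) (fun x => -x.1)) := by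
  set zs := value.zip limit with hzs
  set s := PySem.List.sorted2 zs (fun x => x.2) (fun x => -x.1) with hs
  have hperm : s.Perm zs := PySem.List.sorted2_perm _ _ _ _
  have hpw : s.Pairwise KLE := sorted2_pairwise_KLE _
  unfold maxTotal_alt
  set groups := zs.foldl (fun d p => d.modify p.2 [] (fun g => g ++ [p.1]))
    (PySem.Dict.empty : PySem.Dict Int (List Int)) with hgroups
  have hfun : (fun (total : Int) (kv : Int × List Int) =>
        pvTake kv.1 total 0 (PySem.List.sorted kv.2 (fun x => x) true))
      = (fun total kv => total + Tl kv.1 (PySem.List.sorted kv.2 (fun x => x) true)) := by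
    funext total kv
    exact pvTake_eq_Tl _ _ _
  rw [hfun, PySem.List.foldl_add, zero_add]
  have hswap : groups = (zs.map Prod.swap).foldl
      (fun d p => d.modify p.1 [] (fun g => g ++ [p.2])) PySem.Dict.empty := by
    rw [hgroups, List.foldl_map]
    rfl
  have hgetD : ∀ l : Int, groups.getD l [] = valsOf zs l := by
    intro l
    rw [hswap, PySem.Dict.getD_foldl_modify_append, PySem.Dict.getD_empty, List.nil_append]
    unfold valsOf
    rw [List.filter_map, List.map_map]
    rfl
  have hnodup : groups.keys.Nodup := by
    rw [hgroups]
    exact PySem.Dict.nodup_keys_foldl_modify_key zs (fun p => p.2) [] _ _ PySem.Dict.nodup_keys_empty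
  have hkeys : groups.keys = PySem.List.dedup (zs.map (fun p : Int × Int => p.2)) := by
    rw [hgroups, PySem.Dict.keys_foldl_modify_key, PySem.Dict.keys_empty,
      PySem.Set.update_nil_left, ← PySem.List.dedup_eq_ofList]
  have hterm : ∀ l : Int, Tl l (PySem.List.sorted (valsOf zs l) (fun x => x) true) = Tl l (valsOf s l) := by
    intro l
    rw [sorted_desc_eq s zs hperm hpw l]
  have hitems : groups.items.map (fun kv => Tl kv.1 (PySem.List.sorted kv.2 (fun x => x) true))
      = groups.keys.map (fun l => Tl l (valsOf s l)) := by
    have h1 : ∀ kv ∈ groups.items, kv.2 = valsOf zs kv.1 := by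
      intro kv hkv
      have hm : (kv.1, kv.2) ∈ groups.items := by simpa using hkv
      have := PySem.Dict.getD_of_mem_items groups hm hnodup []
      rw [← this, hgetD]
    have hk : groups.keys = groups.items.map (fun kv => kv.1) := rfl
    rw [hk, List.map_map]
    apply List.map_congr_left
    intro kv hkv
    simp only [Function.comp]
    rw [h1 kv hkv]
    exact hterm kv.1
  rw [hitems, hkeys]
  have hdperm : (PySem.List.dedup (zs.map (fun p : Int × Int => p.2))).Perm
      (PySem.List.dedup (s.map (fun p : Int × Int => p.2))) := by
    apply (List.perm_ext_iff_of_nodup (PySem.List.nodup_dedup _) (PySem.List.nodup_dedup _)).mpr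
    intro x
    rw [PySem.List.mem_dedup, PySem.List.mem_dedup]
    exact (hperm.map _).mem_iff.symm
  exact (hdperm.map _).sum_eq

-- ===== VERDICT (by name: the statement is the Claim_ definition above) =====
theorem maxTotal_spec : Claim_equal_maxTotal := by
  intro value limit _
  unfold Spec_maxTotal
  rw [maxTotal_eq_SpecB, maxTotal_alt_eq_SpecB]
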